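-- pv_equiv track=rewrite | github.com/Aasthaengg/IBMdataset | Python_codes/p02873/s630994043.py | count_rg
-- ===== SOURCE A (Python) =====
-- def count_rg(l):
--
--     revl = reversed(l)
--     ret = [0]
--     cur = 0
--
--     for c in revl:
--         if c == ">":
--             cur += 1
--         else:
--             cur = 0
--
--         ret.append(cur)
--
--     return list(reversed(ret))
-- ===== SOURCE B (Python) =====
-- def count_rg(l):
--     # Build the answer front-to-back by maximal runs of equal elements:
--     # a run of '>' of length L contributes L, L-1, ..., 1; any other run
--     # contributes zeros; a trailing 0 is the sentinel for the end.
--     out = []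
--     i, n = 0, len(l)
--     while i < n:
--         j = i
--         while j < n and l[j] == l[i]:
--             j += 1
--         run = j - i
--         if l[i] == ">":
--             out.extend(range(run, 0, -1))
--         else:
--             out.extend([0] * run)
--         i = j
--     out.append(0)
--     return out
-- ===== Notes on version B (the rewrite author's own statement) =====
-- stated objective: alternative
-- what changed: B scans forward over maximal runs of equal elements and emits each run's whole contribution at once (L..1 for a '>' run, zeros otherwise, then one trailing 0), instead of A's reversed pass with a running counter and a final reversal.
import Mathlib
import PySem

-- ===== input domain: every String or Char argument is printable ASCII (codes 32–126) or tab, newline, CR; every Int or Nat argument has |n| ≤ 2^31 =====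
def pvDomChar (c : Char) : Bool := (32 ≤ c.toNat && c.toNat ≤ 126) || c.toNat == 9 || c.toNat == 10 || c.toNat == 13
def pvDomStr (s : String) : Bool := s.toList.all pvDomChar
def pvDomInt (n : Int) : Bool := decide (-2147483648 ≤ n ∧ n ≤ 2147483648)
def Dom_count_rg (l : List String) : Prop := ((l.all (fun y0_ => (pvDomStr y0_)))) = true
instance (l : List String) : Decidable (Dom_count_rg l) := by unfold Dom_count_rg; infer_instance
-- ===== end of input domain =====

-- B builds the answer by maximal runs of equal elements instead of A's reversed
-- pass with a running counter; same values, same cost, different traversal.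

-- ===== PORT A =====
-- A: iterate over reversed(l) keeping cur = current run of '>', append each cur
-- after [0], then reverse the accumulator.
def count_rg (l : List String) : List Int :=
  let res := l.reverse.foldl
    (fun (s : List Int × Int) (c : String) =>
      let cur : Int := if c = ">" then s.2 + 1 else 0
      (s.1 ++ [cur], cur))
    ([0], 0)
  res.1.reverse

-- ===== PORT B =====
-- split a leading run of elements equal to x: (run length, remainder)
def runSplit (x : String) : List String → Nat × List String
  | [] => (0, [])
  | y :: r => if y = x then ((runSplit x r).1 + 1, (runSplit x r).2) else (0, y :: r)

theorem runSplit_snd_le (x : String) : ∀ (l : List String), (runSplit x l).2.length ≤ l.length := by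
  intro l
  induction l with
  | nil => simp [runSplit]
  | cons y r ih =>
    simp only [runSplit]
    split
    · exact Nat.le_trans ih (Nat.le_succ _)
    · exact Nat.le_refl _

-- B's outer while loop: one recursion step per maximal run
def count_rg_core : List String → List Int
  | [] => []
  | x :: rest =>
    let p := runSplit x rest
    (if x = ">" then PySem.List.pyRange ((p.1 : Int) + 1) 0 (-1)
     else List.replicate (p.1 + 1) (0 : Int)) ++ count_rg_core p.2
termination_by l => l.length
decreasing_by
  simpa using Nat.lt_succ_of_le (runSplit_snd_le x rest)

def count_rg_alt (l : List String) : List Int := count_rg_core l ++ [0]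

-- ===== PRECONDITION & SPEC =====
def Spec_count_rg (l : List String) (out : List Int) : Prop := out = count_rg_alt l
instance (l : List String) (out : List Int) : Decidable (Spec_count_rg l out) := by unfold Spec_count_rg; infer_instance

-- ===== CLAIM (what is proved, stated in full; the proofs are below) =====
def Claim_equal_count_rg : Prop := ∀ (l : List String), Dom_count_rg l → Spec_count_rg l (count_rg l)

-- ===== LEMMAS AND PROOFS =====

-- run length of '>' at the head of a list
def cnt : List String → Int
  | [] => 0
  | c :: r => if c = ">" then cnt r + 1 else 0

-- the common specification: per suffix, its leading-'>' run length
def specS (l : List String) : List Int := l.tails.map cnt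

def stepc (cur : Int) (c : String) : Int := if c = ">" then cur + 1 else 0

-- forward description of A's fold over a (reversed) list
def revspec : List String → Int → List Int
  | [], _ => []
  | c :: r, cur => stepc cur c :: revspec r (stepc cur c)

def curAfter (m : List String) (cur : Int) : Int := m.foldl stepc cur

theorem foldA_eq (m : List String) : ∀ (acc : List Int) (cur : Int),
    m.foldl (fun (s : List Int × Int) (c : String) =>
      let cur := if c = ">" then s.2 + 1 else 0
      (s.1 ++ [cur], cur)) (acc, cur)
    = (acc ++ revspec m cur, curAfter m cur) := by
  induction m with
  | nil => intro acc cur; simp [revspec, curAfter]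
  | cons c r ih =>
    intro acc cur
    simp only [List.foldl_cons, revspec, curAfter, List.foldl_cons]
    rw [ih]
    simp [stepc, curAfter]

theorem revspec_append (c : String) : ∀ (m : List String) (cur : Int),
    revspec (m ++ [c]) cur = revspec m cur ++ [stepc (curAfter m cur) c] := by
  intro m
  induction m with
  | nil => intro cur; simp [revspec, curAfter]
  | cons d r ih => intro cur; simp [revspec, ih, curAfter, stepc]

theorem curAfter_reverse : ∀ (l : List String), curAfter l.reverse 0 = cnt l := by
  intro l
  induction l with
  | nil => simp [curAfter, cnt]
  | cons c r ih =>
    simp only [List.reverse_cons, curAfter, List.foldl_append, cnt]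
    rw [show List.foldl stepc 0 r.reverse = curAfter r.reverse 0 from rfl, ih]
    simp [stepc]

theorem count_rg_eq_specS : ∀ (l : List String), count_rg l = specS l := by
  intro l
  induction l with
  | nil => simp [count_rg, specS, cnt]
  | cons c r ih =>
    simp only [count_rg, List.reverse_cons, foldA_eq] at ih ⊢
    rw [revspec_append, curAfter_reverse]
    simp only [specS, List.tails_cons, List.map_cons] at ih ⊢
    rw [← ih]
    simp [cnt, stepc]

-- B-side lemmas
theorem runSplit_decompose (x : String) : ∀ (l : List String),
    l = List.replicate (runSplit x l).1 x ++ (runSplit x l).2 := by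
  intro l
  induction l with
  | nil => simp [runSplit]
  | cons y r ih =>
    by_cases h : y = x
    · simp [runSplit, h, List.replicate_succ]
      exact ih
    · simp [runSplit, h]

theorem runSplit_head_ne (x : String) : ∀ (l : List String),
    (runSplit x l).2.head? ≠ some x := by
  intro l
  induction l with
  | nil => simp [runSplit]
  | cons y r ih =>
    by_cases h : y = x
    · simpa [runSplit, h] using ih
    · simp [runSplit, h, List.head?]

theorem cnt_head_ne (t : List String) (h : t.head? ≠ some ">") : cnt t = 0 := by
  cases t with
  | nil => simp [cnt]
  | cons c r =>
    simp only [List.head?] at h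
    have : c ≠ ">" := fun hc => h (by rw [hc])
    simp [cnt, this]

theorem specS_replicate_ne (x : String) (hx : x ≠ ">") :
    ∀ (n : Nat) (t : List String),
      specS (List.replicate n x ++ t) = List.replicate n 0 ++ specS t := by
  intro n
  induction n with
  | zero => intro t; simp
  | succ n ih =>
    intro t
    simp only [List.replicate_succ, List.cons_append, specS, List.tails_cons, List.map_cons]
    rw [← specS, ← specS, ih]
    simp [cnt, hx]

theorem specS_replicate_gt :
    ∀ (n : Nat) (t : List String), cnt t = 0 →
      specS (List.replicate n ">" ++ t)
        = PySem.List.pyRange (n : Int) 0 (-1) ++ specS t := by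
  intro n
  induction n with
  | zero => intro t _; simp [PySem.List.pyRange_neg_one_eq_nil]
  | succ n ih =>
    intro t ht
    have hcnt : ∀ m : Nat, cnt (List.replicate m ">" ++ t) = (m : Int) := by
      intro m
      induction m with
      | zero => simpa using ht
      | succ m ihm => simp [List.replicate_succ, cnt, ihm]
    simp only [List.replicate_succ, List.cons_append, specS, List.tails_cons, List.map_cons]
    rw [← specS, ← specS, ih t ht]
    have hrange : PySem.List.pyRange ((n : Int) + 1) 0 (-1)
        = ((n : Int) + 1) :: PySem.List.pyRange (n : Int) 0 (-1) := by
      have := PySem.List.pyRange_neg_one_cons (a := (n : Int) + 1) (b := 0)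
        (by positivity)
      simpa using this
    have hhead : cnt (List.replicate (n + 1) ">" ++ t) = (n : Int) + 1 := by
      simpa using hcnt (n + 1)
    simp only [List.replicate_succ, List.cons_append] at hhead
    rw [hhead]
    push_cast
    rw [hrange]
    simp

theorem count_rg_alt_eq_specS : ∀ (l : List String), count_rg_alt l = specS l := by
  intro l
  induction hn : l.length using Nat.strong_induction_on generalizing l with
  | _ n ih =>
  cases l with
  | nil => simp [count_rg_alt, count_rg_core, specS, cnt]
  | cons x rest =>
    subst hn
    have hdec := runSplit_decompose x rest
    have hlen : (runSplit x rest).2.length < (x :: rest).length :=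
      Nat.lt_succ_of_le (runSplit_snd_le x rest)
    have ihr : count_rg_alt (runSplit x rest).2 = specS (runSplit x rest).2 :=
      ih _ hlen _ rfl
    have hl : x :: rest = List.replicate ((runSplit x rest).1 + 1) x ++ (runSplit x rest).2 := by
      rw [List.replicate_succ, List.cons_append, ← hdec]
    simp only [count_rg_alt, count_rg_core]
    by_cases hx : x = ">"
    · subst hx
      have ht : cnt (runSplit ">" rest).2 = 0 :=
        cnt_head_ne _ (runSplit_head_ne ">" rest)
      rw [List.append_assoc, ← count_rg_alt, ihr, if_pos rfl]
      rw [hl, specS_replicate_gt _ _ ht]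
      push_cast
      rfl
    · rw [List.append_assoc, ← count_rg_alt, ihr, if_neg hx]
      rw [hl, specS_replicate_ne x hx]

-- ===== VERDICT (by name: the statement is the Claim_ definition above) =====
theorem count_rg_spec : Claim_equal_count_rg := by
  intro l _
  unfold Spec_count_rg
  rw [count_rg_eq_specS, count_rg_alt_eq_specS]
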